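-- pv_equiv track=rewrite | github.com/btnalit/Attract-wealth | src/core/degrade_policy.py | _pick_recommended_action
-- ===== SOURCE A (Python) =====
-- from typing import Any, Callable
--
-- def _normalize_action(action: str | None, *, default: str = "force_hold") -> str:
--     value = str(action or "").strip().lower()
--     if value in {"force_hold", "warn_only", "none"}:
--         return value
--     return default
--
-- ACTION_RANK: dict[str, int] = {
--     "none": 0,
--     "warn_only": 1,
--     "force_hold": 2,
-- }
--
-- def _pick_recommended_action(rules: list[dict[str, Any]]) -> str:
--     if not rules:
--         return "none"
--     recommended_action = max(
--         (str(item.get("action", "none")) for item in rules),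
--         key=lambda action: ACTION_RANK.get(_normalize_action(action, default="none"), 0),
--         default="none",
--     )
--     return _normalize_action(recommended_action, default="none")
-- ===== SOURCE B (Python) =====
-- def _pick_recommended_action(rules):
--     # Simpler: collect the set of normalized actions once, then answer by severity cascade.
--     present = set()
--     for item in rules:
--         v = str(item.get("action", "none")).strip().lower()
--         present.add(v if v in ("force_hold", "warn_only") else "none")
--     if "force_hold" in present:
--         return "force_hold"
--     if "warn_only" in present:
--         return "warn_only"
--     return "none"
-- ===== Notes on version B (the rewrite author's own statement) =====
-- stated objective: simpler
-- what changed: Replaces max-by-rank over raw action strings followed by a second normalization pass with a single pass that builds the set of normalized actions and returns by a fixed severity cascade (force_hold > warn_only > none), dropping the rank dictionary and the normalize helper's default machinery.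
import Mathlib
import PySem

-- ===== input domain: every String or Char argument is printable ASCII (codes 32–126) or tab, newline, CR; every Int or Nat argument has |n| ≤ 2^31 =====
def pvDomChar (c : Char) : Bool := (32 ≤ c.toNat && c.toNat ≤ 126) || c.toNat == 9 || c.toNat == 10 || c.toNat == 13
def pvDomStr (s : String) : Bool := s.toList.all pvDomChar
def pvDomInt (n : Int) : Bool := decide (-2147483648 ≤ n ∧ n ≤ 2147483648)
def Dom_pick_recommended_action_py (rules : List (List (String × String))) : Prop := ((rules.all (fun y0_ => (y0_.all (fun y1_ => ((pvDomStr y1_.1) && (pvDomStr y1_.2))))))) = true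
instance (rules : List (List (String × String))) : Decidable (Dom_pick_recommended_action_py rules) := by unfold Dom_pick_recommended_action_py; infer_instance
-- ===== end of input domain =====

-- B replaces A's max-by-rank-then-normalize with one pass collecting the set of normalized actions and a fixed severity cascade; objective: simpler.


-- ===== PORT A =====
-- _normalize_action(action, default=dflt); 'str(action or "")' on a string is '"" if action == "" else action'
def pvNormalizeA (action : String) (dflt : String) : String :=
  let value := PySem.Str.lower (PySem.Str.strip (if action = "" then "" else action))
  if value = "force_hold" ∨ value = "warn_only" ∨ value = "none" then value else dflt

-- ACTION_RANK module constant
def pvActionRank : PySem.Dict String Int :=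
  PySem.Dict.ofList [("none", 0), ("warn_only", 1), ("force_hold", 2)]

def pick_recommended_action_py (rules : List (List (String × String))) : String :=
  if rules = [] then "none"
  else
    let recommended_action := PySem.List.maxD
      (rules.map (fun item => (PySem.Dict.mk item).getD "action" "none"))
      (fun action => pvActionRank.getD (pvNormalizeA action "none") 0)
      "none"
    pvNormalizeA recommended_action "none"

-- ===== PORT B =====
def pvNormB (action : String) : String :=
  let v := PySem.Str.lower (PySem.Str.strip action)
  if v = "force_hold" ∨ v = "warn_only" then v else "none"

def pick_recommended_action_py_alt (rules : List (List (String × String))) : String :=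
  let present : PySem.Set String :=
    PySem.Set.ofList (rules.map (fun item => pvNormB ((PySem.Dict.mk item).getD "action" "none")))
  if "force_hold" ∈ present then "force_hold"
  else if "warn_only" ∈ present then "warn_only"
  else "none"

-- ===== PRECONDITION & SPEC =====
def Spec_pick_recommended_action_py (rules : List (List (String × String))) (out : String) : Prop := out = pick_recommended_action_py_alt rules
instance (rules : List (List (String × String))) (out : String) : Decidable (Spec_pick_recommended_action_py rules out) := by unfold Spec_pick_recommended_action_py; infer_instance

-- ===== CLAIM (what is proved, stated in full; the proofs are below) =====
def Claim_equal_pick_recommended_action_py : Prop := ∀ (rules : List (List (String × String))), Dom_pick_recommended_action_py rules → Spec_pick_recommended_action_py rules (pick_recommended_action_py rules)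

-- ===== LEMMAS AND PROOFS =====

-- numeric rank of a normalized action (proof helper)
def pvRank (s : String) : Int :=
  if s = "force_hold" then 2 else if s = "warn_only" then 1 else 0

-- A's normalization with default "none" is B's normalization
theorem pvNormA_eq_normB (a : String) : pvNormalizeA a "none" = pvNormB a := by
  unfold pvNormalizeA pvNormB
  by_cases h : a = ""
  · subst h; decide
  · simp only [if_neg h]
    split_ifs <;> simp_all

theorem pvNormB_cases (a : String) :
    pvNormB a = "force_hold" ∨ pvNormB a = "warn_only" ∨ pvNormB a = "none" := by
  unfold pvNormB
  dsimp only
  split_ifs with h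
  · rcases h with h | h <;> simp [h]
  · simp

-- the rank a raw action gets in A's key, expressed through B's normalization
theorem pvKey_eq (a : String) :
    pvActionRank.getD (pvNormalizeA a "none") 0 = pvRank (pvNormB a) := by
  rw [pvNormA_eq_normB]
  rcases pvNormB_cases a with h | h | h <;> rw [h] <;> decide

-- ===== VERDICT (by name: the statement is the Claim_ definition above) =====
theorem pick_recommended_action_py_spec : Claim_equal_pick_recommended_action_py := by
  intro rules _
  unfold Spec_pick_recommended_action_py pick_recommended_action_py pick_recommended_action_py_alt
  by_cases hnil : rules = []
  · simp [hnil, PySem.Set.ofList]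
  · simp only [hnil, if_false]
    set raws := rules.map (fun item => (PySem.Dict.mk item).getD "action" "none") with hraws
    have hraws_ne : raws ≠ [] := by simp [hraws, hnil]
    obtain ⟨m, hm⟩ : ∃ m, PySem.List.max? raws
        (fun action => pvActionRank.getD (pvNormalizeA action "none") 0) = some m := by
      cases h : PySem.List.max? raws (fun action => pvActionRank.getD (pvNormalizeA action "none") 0)
      · exact absurd ((PySem.List.max?_eq_none_iff raws _).1 h) hraws_ne
      · exact ⟨_, rfl⟩
    have hmem := PySem.List.max?_mem hm
    have hmax : ∀ y ∈ raws, pvRank (pvNormB y) ≤ pvRank (pvNormB m) := by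
      intro y hy
      simpa only [pvKey_eq] using PySem.List.max?_isMax hm y hy
    have hmaxD : PySem.List.maxD raws
        (fun action => pvActionRank.getD (pvNormalizeA action "none") 0) "none" = m := by
      simp [PySem.List.maxD, hm]
    rw [hmaxD, pvNormA_eq_normB]
    have hset : ∀ s : String,
        (s ∈ PySem.Set.ofList (rules.map (fun item => pvNormB ((PySem.Dict.mk item).getD "action" "none")))) ↔
          ∃ a ∈ raws, pvNormB a = s := by
      intro s
      rw [PySem.Set.mem_ofList]
      simp [hraws, List.mem_map]
    by_cases hF : ∃ a ∈ raws, pvNormB a = "force_hold"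
    · obtain ⟨a, ha, hna⟩ := hF
      have h2 : (2 : Int) ≤ pvRank (pvNormB m) := by
        have := hmax a ha; rwa [hna] at this
      have hm2 : pvNormB m = "force_hold" := by
        rcases pvNormB_cases m with h | h | h
        · exact h
        all_goals (exfalso; rw [h] at h2; simp [pvRank] at h2)
      rw [hm2, if_pos ((hset "force_hold").2 ⟨a, ha, hna⟩)]
    · by_cases hW : ∃ a ∈ raws, pvNormB a = "warn_only"
      · obtain ⟨a, ha, hna⟩ := hW
        have h1 : (1 : Int) ≤ pvRank (pvNormB m) := by
          have := hmax a ha; rw [hna] at this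
          exact le_trans (by decide) this
        have hm2 : pvNormB m = "warn_only" := by
          rcases pvNormB_cases m with h | h | h
          · exact absurd ⟨m, hmem, h⟩ hF
          · exact h
          · exfalso; rw [h] at h1; simp [pvRank] at h1
        rw [hm2, if_neg, if_pos ((hset "warn_only").2 ⟨a, ha, hna⟩)]
        intro hc; exact hF ((hset "force_hold").1 hc)
      · have hm3 : pvNormB m = "none" := by
          rcases pvNormB_cases m with h | h | h
          · exact absurd ⟨m, hmem, h⟩ hF
          · exact absurd ⟨m, hmem, h⟩ hW
          · exact h
        rw [hm3, if_neg, if_neg]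
        · intro hc; exact hW ((hset "warn_only").1 hc)
        · intro hc; exact hF ((hset "force_hold").1 hc)
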